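-- pv_equiv track=rewrite | github.com/orestis/homeassistant | wall-display/app.py | _pick_forecast_icon
-- ===== SOURCE A (Python) =====
-- _CONDITION_PRIORITY = [
--     ("lightning-rainy", "⛈️"),
--     ("lightning", "🌩️"),
--     ("pouring", "🌧️"),
--     ("rainy", "🌧️"),
--     ("hail", "🌨️"),
--     ("snowy-rainy", "🌨️"),
--     ("snowy", "❄️"),
--     ("windy-variant", "💨"),
--     ("windy", "💨"),
--     ("fog", "🌫️"),
--     ("cloudy", "☁️"),
--     ("partlycloudy", "⛅"),
--     ("exceptional", "⚠️"),
-- ]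
--
-- def _pick_forecast_icon(conditions: list[str]) -> str:
--     """Pick the most severe weather icon from a list of HA conditions.
--
--     Severity-based: the worst upcoming condition wins.
--     For the clear-sky fallback, we check whether the majority of forecast
--     hours are nighttime (clear-night) and return 🌙 instead of ☀️.
--     """
--     # Normalise night → day for severity comparison only
--     cond_set = {("sunny" if c == "clear-night" else c) for c in conditions}
--     for cond, icon in _CONDITION_PRIORITY:
--         if cond in cond_set:
--             return icon
--     # Clear sky fallback — pick moon or sun based on forecast hours
--     night_count = sum(1 for c in conditions if c == "clear-night")
--     if night_count > len(conditions) / 2: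
--         return "🌙"
--     return "☀️"
-- ===== SOURCE B (Python) =====
-- _CONDITION_PRIORITY = [
--     ("lightning-rainy", "⛈️"),
--     ("lightning", "🌩️"),
--     ("pouring", "🌧️"),
--     ("rainy", "🌧️"),
--     ("hail", "🌨️"),
--     ("snowy-rainy", "🌨️"),
--     ("snowy", "❄️"),
--     ("windy-variant", "💨"),
--     ("windy", "💨"),
--     ("fog", "🌫️"),
--     ("cloudy", "☁️"),
--     ("partlycloudy", "⛅"),
--     ("exceptional", "⚠️"),
-- ]
--
-- _RANK = {name: i for i, (name, _) in enumerate(_CONDITION_PRIORITY)}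
--
-- def _pick_forecast_icon(conditions: list[str]) -> str:
--     """Single pass over the conditions keeping the minimum severity rank
--     (and counting nights along the way); icon looked up at the end."""
--     best = None
--     night = 0
--     for c in conditions:
--         if c == "clear-night":
--             night += 1
--             c = "sunny"
--         r = _RANK.get(c)
--         if r is not None and (best is None or r < best):
--             best = r
--     if best is not None:
--         return _CONDITION_PRIORITY[best][1]
--     return "🌙" if 2 * night > len(conditions) else "☀️"
-- ===== Notes on version B (the rewrite author's own statement) =====
-- stated objective: alternative
-- what changed: A scans the fixed priority list testing set membership of the input; B makes a single pass over the input conditions, looking each one up in a precomputed name-to-rank dict and keeping the minimum rank (counting clear-night hours in the same pass), then indexes the priority list once.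
import Mathlib
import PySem

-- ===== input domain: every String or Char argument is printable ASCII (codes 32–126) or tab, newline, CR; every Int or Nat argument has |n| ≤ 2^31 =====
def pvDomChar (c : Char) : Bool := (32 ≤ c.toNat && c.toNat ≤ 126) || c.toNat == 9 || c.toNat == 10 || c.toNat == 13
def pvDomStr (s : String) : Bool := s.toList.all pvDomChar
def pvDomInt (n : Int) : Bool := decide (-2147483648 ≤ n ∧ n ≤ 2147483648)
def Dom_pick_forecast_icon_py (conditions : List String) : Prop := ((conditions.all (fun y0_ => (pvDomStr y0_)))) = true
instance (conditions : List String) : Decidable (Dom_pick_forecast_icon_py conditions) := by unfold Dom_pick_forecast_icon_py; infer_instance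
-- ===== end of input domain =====

-- B replaces A's scan over the fixed priority list (membership test per entry) by a single
-- pass over the conditions keeping the minimum severity rank (objective: alternative).

-- ===== PORT A =====
-- _CONDITION_PRIORITY
def pvPriority : List (String × String) := [
    ("lightning-rainy", "⛈️"),
    ("lightning", "🌩️"),
    ("pouring", "🌧️"),
    ("rainy", "🌧️"),
    ("hail", "🌨️"),
    ("snowy-rainy", "🌨️"),
    ("snowy", "❄️"),
    ("windy-variant", "💨"),
    ("windy", "💨"),
    ("fog", "🌫️"),
    ("cloudy", "☁️"),
    ("partlycloudy", "⛅"),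
    ("exceptional", "⚠️")]

-- "sunny" if c == "clear-night" else c
def pvNorm (c : String) : String := if c = "clear-night" then "sunny" else c

-- A's 'for cond, icon in _CONDITION_PRIORITY: if cond in cond_set: return icon'
def pvALoop : List (String × String) → PySem.Set String → Option String
  | [], _ => none
  | (cond, icon) :: rest, s =>
      if PySem.Set.contains s cond then some icon else pvALoop rest s

def pick_forecast_icon_py (conditions : List String) : String :=
  let condSet : PySem.Set String := PySem.Set.ofList (conditions.map pvNorm)
  match pvALoop pvPriority condSet with
  | some icon => icon
  | none =>
      let nightCount := conditions.foldl (fun acc c => acc + (if c = "clear-night" then 1 else 0)) 0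
      -- 'night_count > len(conditions) / 2' compares an int with an exact float; on this
      -- range it is exactly '2 * night_count > len(conditions)'
      if 2 * nightCount > conditions.length then "🌙" else "☀️"

-- ===== PORT B =====
-- _RANK = {name: i for i, (name, _) in enumerate(_CONDITION_PRIORITY)}
def pvRank : PySem.Dict String Int :=
  (PySem.List.enumerate pvPriority).foldl (fun d p => d.insert p.2.1 p.1) PySem.Dict.empty

-- one iteration of B's loop; state = (best, night)
def pvBStep (st : Option Int × Nat) (c : String) : Option Int × Nat :=
  let night := if c = "clear-night" then st.2 + 1 else st.2
  let c' := if c = "clear-night" then "sunny" else c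
  match PySem.Dict.get? pvRank c' with
  | some r =>
      match st.1 with
      | none => (some r, night)
      | some b => (if r < b then some r else some b, night)
  | none => (st.1, night)

def pick_forecast_icon_py_alt (conditions : List String) : String :=
  let st := conditions.foldl pvBStep (none, 0)
  match st.1 with
  | some best =>
      -- _CONDITION_PRIORITY[best][1]; best is always a valid index, so the none branch is unreachable
      match PySem.List.pyGet? pvPriority best with
      | some p => p.2
      | none => ""
  | none => if 2 * st.2 > conditions.length then "🌙" else "☀️"

-- ===== PRECONDITION & SPEC =====
def Spec_pick_forecast_icon_py (conditions : List String) (out : String) : Prop := out = pick_forecast_icon_py_alt conditions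
instance (conditions : List String) (out : String) : Decidable (Spec_pick_forecast_icon_py conditions out) := by unfold Spec_pick_forecast_icon_py; infer_instance

-- ===== CLAIM (what is proved, stated in full; the proofs are below) =====
def Claim_equal_pick_forecast_icon_py : Prop := ∀ (conditions : List String), Dom_pick_forecast_icon_py conditions → Spec_pick_forecast_icon_py conditions (pick_forecast_icon_py conditions)

-- ===== LEMMAS AND PROOFS =====

-- minimum of two optional ranks
def pvOmin {α : Type} [LinearOrder α] : Option α → Option α → Option α
  | none, o => o
  | some a, none => some a
  | some a, some b => some (min a b)

lemma pvOmin_none {α : Type} [LinearOrder α] (o : Option α) : pvOmin o none = o := by cases o <;> rfl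

lemma pv_foldl_min_comm {α : Type} [LinearOrder α] (l : List α) : ∀ a b, l.foldl min (min a b) = min a (l.foldl min b) := by
  induction l with
  | nil => intro a b; simp
  | cons c l ih =>
      intro a b
      simp only [List.foldl_cons]
      rw [min_assoc, ih]

lemma pv_min?_cons_omin {α : Type} [LinearOrder α] (r : α) (l : List α) : (r :: l).min? = pvOmin (some r) l.min? := by
  cases l with
  | nil => rfl
  | cons a l => simp [List.min?, pvOmin, pv_foldl_min_comm]

-- B's fold computes (min rank, night count)
lemma pvOmin_assoc {α : Type} [LinearOrder α] (a b c : Option α) :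
    pvOmin (pvOmin a b) c = pvOmin a (pvOmin b c) := by
  cases a <;> cases b <;> cases c <;> simp [pvOmin, min_assoc]

lemma pv_bstep_fst (b : Option Int) (k : Nat) (c : String) :
    (pvBStep (b, k) c).1 = pvOmin b (PySem.Dict.get? pvRank (pvNorm c)) := by
  simp only [pvBStep, pvNorm]
  cases hr : PySem.Dict.get? pvRank (if c = "clear-night" then "sunny" else c) with
  | none => cases b <;> simp [pvOmin]
  | some r =>
      cases b with
      | none => simp [pvOmin]
      | some x =>
          simp only [pvOmin]
          split_ifs with h <;> (simp; omega)

lemma pv_bstep_snd (b : Option Int) (k : Nat) (c : String) :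
    (pvBStep (b, k) c).2 = k + (if c = "clear-night" then 1 else 0) := by
  simp only [pvBStep]
  cases PySem.Dict.get? pvRank (if c = "clear-night" then "sunny" else c) with
  | none => split_ifs <;> simp
  | some r => cases b <;> split_ifs <;> simp

lemma pv_bfold (L : List String) : ∀ (b : Option Int) (k : Nat),
    L.foldl pvBStep (b, k) =
      (pvOmin b (L.filterMap (fun c => PySem.Dict.get? pvRank (pvNorm c))).min?,
       k + L.countP (fun c => c == "clear-night")) := by
  induction L with
  | nil => intro b k; simp [pvOmin_none]
  | cons c L ih =>
      intro b k
      have hsurj : pvBStep (b, k) c = ((pvBStep (b, k) c).1, (pvBStep (b, k) c).2) := rfl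
      rw [List.foldl_cons, hsurj, ih, pv_bstep_fst, pv_bstep_snd]
      simp only [Prod.mk.injEq]
      refine ⟨?_, ?_⟩
      · -- min component
        cases hr : PySem.Dict.get? pvRank (pvNorm c) with
        | none => simp only [hr, List.filterMap_cons, pvOmin_none]
        | some r =>
            simp only [hr, List.filterMap_cons]
            rw [pv_min?_cons_omin, pvOmin_assoc]
      · -- night component
        simp only [List.countP_cons]
        by_cases h : c = "clear-night" <;> simp [h] <;> omega

-- rank dict lookup = first index in the priority list
set_option maxHeartbeats 1600000 in
lemma pv_rank_get (c : String) :
    PySem.Dict.get? pvRank c = (pvPriority.findIdx? (fun p => p.1 == c)).map (fun n : Nat => (n : Int)) := by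
  by_cases h0 : c = "lightning-rainy"
  · subst h0; decide
  by_cases h1 : c = "lightning"
  · subst h1; decide
  by_cases h2 : c = "pouring"
  · subst h2; decide
  by_cases h3 : c = "rainy"
  · subst h3; decide
  by_cases h4 : c = "hail"
  · subst h4; decide
  by_cases h5 : c = "snowy-rainy"
  · subst h5; decide
  by_cases h6 : c = "snowy"
  · subst h6; decide
  by_cases h7 : c = "windy-variant"
  · subst h7; decide
  by_cases h8 : c = "windy"
  · subst h8; decide
  by_cases h9 : c = "fog"
  · subst h9; decide
  by_cases h10 : c = "cloudy"
  · subst h10; decide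
  by_cases h11 : c = "partlycloudy"
  · subst h11; decide
  by_cases h12 : c = "exceptional"
  · subst h12; decide
  have hlit : pvRank = PySem.Dict.mk [("lightning-rainy", (0 : Int)), ("lightning", (1 : Int)), ("pouring", (2 : Int)), ("rainy", (3 : Int)), ("hail", (4 : Int)), ("snowy-rainy", (5 : Int)), ("snowy", (6 : Int)), ("windy-variant", (7 : Int)), ("windy", (8 : Int)), ("fog", (9 : Int)), ("cloudy", (10 : Int)), ("partlycloudy", (11 : Int)), ("exceptional", (12 : Int))] := by rfl
  rw [hlit]
  simp [pvPriority, List.findIdx?_cons, PySem.Dict.get?,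
    Ne.symm h0, Ne.symm h1, Ne.symm h2, Ne.symm h3, Ne.symm h4, Ne.symm h5, Ne.symm h6, Ne.symm h7, Ne.symm h8, Ne.symm h9, Ne.symm h10, Ne.symm h11, Ne.symm h12]

-- minimum of a Nat list containing 0
lemma pv_min?_zero (l : List Nat) (h : (0 : Nat) ∈ l) : l.min? = some 0 := by
  induction l with
  | nil => cases h
  | cons a l ih =>
      rw [pv_min?_cons_omin]
      rcases List.mem_cons.mp h with rfl | h'
      · cases hm : l.min? <;> simp [pvOmin]
      · rw [ih h']; simp [pvOmin]

lemma pv_foldl_min_add (l : List Nat) : ∀ a : Nat,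
    (l.map (· + 1)).foldl min (a + 1) = l.foldl min a + 1 := by
  induction l with
  | nil => intro a; simp
  | cons c l ih =>
      intro a
      have hmin : min (a + 1) (c + 1) = min a c + 1 := by omega
      simp only [List.map_cons, List.foldl_cons, hmin, ih]

lemma pv_min?_map_add_one (l : List Nat) :
    (l.map (· + 1)).min? = l.min?.map (· + 1) := by
  cases l with
  | nil => rfl
  | cons a l => simp [List.min?, pv_foldl_min_add]

lemma pv_foldl_min_cast (l : List Nat) : ∀ a : Nat,
    ((l.map (fun n : Nat => (n : Int))).foldl min (a : Int)) = ((l.foldl min a : Nat) : Int) := by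
  induction l with
  | nil => intro a; simp
  | cons c l ih =>
      intro a
      have hmin : min ((a : Int)) ((c : Int)) = ((min a c : Nat) : Int) := by
        simp [Nat.cast_min]
      simp only [List.map_cons, List.foldl_cons, hmin, ih]

lemma pv_min?_map_cast (l : List Nat) :
    (l.map (fun n : Nat => (n : Int))).min? = l.min?.map (fun n : Nat => (n : Int)) := by
  cases l with
  | nil => rfl
  | cons a l => simp [List.min?, pv_foldl_min_cast]

-- min rank over the list = first index whose name occurs in the list
lemma pv_core (ps : List (String × String)) (L : List String) :
    (L.filterMap (fun c => ps.findIdx? (fun p => p.1 == c))).min? =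
      ps.findIdx? (fun p => decide (p.1 ∈ L)) := by
  induction ps with
  | nil => simp
  | cons p ps ih =>
      by_cases h : p.1 ∈ L
      · have hR : (p :: ps).findIdx? (fun q => decide (q.1 ∈ L)) = some 0 := by
          simp [List.findIdx?_cons, h]
        rw [hR]
        apply pv_min?_zero
        refine List.mem_filterMap.mpr ⟨p.1, h, ?_⟩
        simp [List.findIdx?_cons]
      · have hcong : L.filterMap (fun c => (p :: ps).findIdx? (fun q => q.1 == c)) =
            L.filterMap (fun c => (ps.findIdx? (fun q => q.1 == c)).map (· + 1)) := by
          apply List.filterMap_congr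
          intro c hc
          have hne : ¬((p.1 == c) = true) := by
            simp only [beq_iff_eq]
            rintro rfl
            exact h hc
          simp [List.findIdx?_cons, hne]
        rw [hcong, ← List.map_filterMap, pv_min?_map_add_one, ih]
        simp [List.findIdx?_cons, h]

-- A's loop = lookup at the first matching index
lemma pv_aloop (ps : List (String × String)) (L : List String) :
    pvALoop ps (PySem.Set.ofList L) =
      (ps.findIdx? (fun p => decide (p.1 ∈ L))).bind (fun i => ps[i]?.map (·.2)) := by
  induction ps with
  | nil => simp [pvALoop]
  | cons p ps ih =>
      obtain ⟨cond, icon⟩ := p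
      by_cases h : cond ∈ L
      · simp [pvALoop, PySem.Set.contains, PySem.Set.mem_ofList, h, List.findIdx?_cons]
      · rw [show pvALoop ((cond, icon) :: ps) (PySem.Set.ofList L) = pvALoop ps (PySem.Set.ofList L) by
            simp [pvALoop, PySem.Set.contains, PySem.Set.mem_ofList, h]]
        rw [ih]
        simp only [List.findIdx?_cons, h, decide_false, Bool.false_eq_true, if_false]
        cases hf : ps.findIdx? (fun p => decide (p.1 ∈ L)) with
        | none => simp
        | some i => simp

lemma pv_night (L : List String) : ∀ a : Nat,
    L.foldl (fun acc c => acc + (if c = "clear-night" then 1 else 0)) a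
      = a + L.countP (fun c => c == "clear-night") := by
  induction L with
  | nil => intro a; simp
  | cons c L ih =>
      intro a
      by_cases h : c = "clear-night" <;> simp [h, ih] <;> omega

-- ===== VERDICT (by name: the statement is the Claim_ definition above) =====
theorem pick_forecast_icon_py_spec : Claim_equal_pick_forecast_icon_py := by
  intro conditions _
  unfold Spec_pick_forecast_icon_py pick_forecast_icon_py pick_forecast_icon_py_alt
  simp only []
  rw [pv_aloop pvPriority (conditions.map pvNorm), pv_bfold conditions none 0]
  have hchain : (conditions.filterMap (fun c => PySem.Dict.get? pvRank (pvNorm c))).min?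
      = ((pvPriority.findIdx? (fun p => decide (p.1 ∈ conditions.map pvNorm))).map
          (fun n : Nat => (n : Int))) := by
    calc (conditions.filterMap (fun c => PySem.Dict.get? pvRank (pvNorm c))).min?
        = ((conditions.map pvNorm).filterMap (fun c => PySem.Dict.get? pvRank c)).min? := by
          rw [List.filterMap_map]; rfl
      _ = ((conditions.map pvNorm).filterMap
            (fun c => (pvPriority.findIdx? (fun p => p.1 == c)).map (fun n : Nat => (n : Int)))).min? := by
          exact congrArg List.min? (List.filterMap_congr (fun c _ => pv_rank_get c))
      _ = (((conditions.map pvNorm).filterMap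
            (fun c => pvPriority.findIdx? (fun p => p.1 == c))).map (fun n : Nat => (n : Int))).min? := by
          rw [List.map_filterMap]
      _ = (((conditions.map pvNorm).filterMap
            (fun c => pvPriority.findIdx? (fun p => p.1 == c))).min?).map (fun n : Nat => (n : Int)) := by
          rw [pv_min?_map_cast]
      _ = _ := by rw [pv_core]
  rw [hchain]
  cases hidx : pvPriority.findIdx? (fun p => decide (p.1 ∈ conditions.map pvNorm)) with
  | none =>
      simp only [Option.map_none, Option.bind_none]
      show (if _ > _ then _ else _) = _
      rw [pv_night conditions 0]
      rfl
  | some i =>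
      have hi : i < pvPriority.length := by
        have := List.findIdx?_eq_some_iff_findIdx_eq.mp hidx
        omega
      obtain ⟨p, hp⟩ : ∃ p, pvPriority[i]? = some p := ⟨pvPriority[i], List.getElem?_eq_getElem hi⟩
      simp only [Option.map_some, Option.bind_some, hp, pvOmin]
      simp [PySem.List.pyGet?_natCast, hp]
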